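-- pv_equiv track=rewrite | github.com/k-harada/AtCoder | ABC/ABC193/C.py | solve
-- ===== SOURCE A (Python) =====
-- def solve(n):
--     res_list = []
--     for i in range(2, n):
--         d = i * i
--         if d > n:
--             break
--         while d <= n:
--             res_list.append(d)
--             d *= i
--     res = n - len(set(res_list))
--     return res
-- ===== SOURCE B (Python) =====
-- def _isqrt(n):
--     # exact integer square root by doubling + binary search (n >= 0)
--     lo, hi = 0, 1
--     while hi * hi <= n:
--         hi *= 2
--     while lo + 1 < hi:
--         mid = (lo + hi) // 2
--         if mid * mid <= n:
--             lo = mid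
--         else:
--             hi = mid
--     return lo
--
--
-- def solve(n):
--     # non-perfect-powers up to n = n - #squares in [4,n] - #non-square perfect powers <= n
--     if n < 4:
--         return n
--     r = _isqrt(n)  # squares 2^2 .. r^2 account for r - 1 perfect powers
--     extras = set()
--     k = 3
--     while 2 ** k <= n:
--         i = 2
--         while i ** k <= n:
--             m = i ** k
--             s = _isqrt(m)
--             if s * s != m:
--                 extras.add(m)
--             i += 1
--         k += 1
--     return n - (r - 1) - len(extras)
-- ===== Notes on version B (the rewrite author's own statement) =====
-- stated objective: faster
-- what changed: Replaces base-major enumeration of all perfect powers into a list-then-set with a counting formula: the squares up to n are counted arithmetically from an exact binary-search integer square root, and only the sparse non-square powers with higher exponents are enumerated into a set.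
import Mathlib
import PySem

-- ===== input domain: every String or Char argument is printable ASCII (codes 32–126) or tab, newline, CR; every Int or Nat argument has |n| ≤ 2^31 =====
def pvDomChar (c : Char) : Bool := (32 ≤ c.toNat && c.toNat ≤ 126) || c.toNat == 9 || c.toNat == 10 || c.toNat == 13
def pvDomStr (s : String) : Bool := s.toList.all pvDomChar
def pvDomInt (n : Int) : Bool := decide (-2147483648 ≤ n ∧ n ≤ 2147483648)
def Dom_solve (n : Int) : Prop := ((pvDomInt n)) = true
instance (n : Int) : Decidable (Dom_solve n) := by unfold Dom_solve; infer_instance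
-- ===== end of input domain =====

-- B counts perfect powers arithmetically (squares by integer square root, plus the few
-- non-square powers with exponent ≥ 3) instead of enumerating them all into a set: faster.

-- ===== PORT A =====
-- inner 'while d <= n: res_list.append(d); d *= i' (the '2 ≤ i ∧ 1 ≤ d' conjuncts only
-- make the recursion total; every call site has i ≥ 2, d = i*i ≥ 4, so behaviour is unchanged)
def powersFrom (n i d : Int) : List Int :=
  if 2 ≤ i ∧ 1 ≤ d ∧ d ≤ n then d :: powersFrom n i (d * i) else []
termination_by (n + 1 - d).toNat
decreasing_by
  rename_i h
  have h1 : d + 1 ≤ d * i := by nlinarith [h.1, h.2.1]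
  omega

-- 'for i in range(2, n): d = i*i; if d > n: break; <inner loop>'
def aLoop (n : Int) : List Int → List Int
  | [] => []
  | i :: rest => if i * i > n then [] else powersFrom n i (i * i) ++ aLoop n rest

def solve (n : Int) : Int :=
  n - ((PySem.Set.ofList (aLoop n (PySem.List.pyRange 2 n 1))).length : Int)

-- ===== PORT B =====
-- 'while hi * hi <= n: hi *= 2'  (the '1 ≤ hi' conjunct only makes the recursion total; called with hi = 1)
def isqrtUp (n hi : Int) : Int :=
  if 1 ≤ hi ∧ hi * hi ≤ n then isqrtUp n (hi * 2) else hi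
termination_by (n + 1 - hi).toNat
decreasing_by
  rename_i h
  have h2 : hi ≤ n := by nlinarith [h.1, h.2]
  omega

-- 'while lo + 1 < hi: mid = (lo+hi)//2; if mid*mid <= n: lo = mid else: hi = mid'
def isqrtBin (n lo hi : Int) : Int :=
  if _h : lo + 1 < hi then
    let mid := PySem.Int.floordiv (lo + hi) 2
    if mid * mid ≤ n then isqrtBin n mid hi else isqrtBin n lo mid
  else lo
termination_by (hi - lo).toNat
decreasing_by
  · have hm : PySem.Int.floordiv (lo + hi) 2 = (lo + hi) / 2 :=
      PySem.Int.floordiv_eq_ediv_of_pos (by omega)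
    simp only [hm]; omega
  · have hm : PySem.Int.floordiv (lo + hi) 2 = (lo + hi) / 2 :=
      PySem.Int.floordiv_eq_ediv_of_pos (by omega)
    simp only [hm]; omega

def isqrtI (n : Int) : Int := isqrtBin n 0 (isqrtUp n 1)

-- 'while i ** k <= n: m = i**k; s = _isqrt(m); if s*s != m: extras.add(m); i += 1'
-- (the '2 ≤ i ∧ 1 ≤ k' conjuncts only make the recursion total; called with i = 2, k ≥ 3)
def bInner (n : Int) (k : Nat) (i : Int) (s : PySem.Set Int) : PySem.Set Int :=
  if 2 ≤ i ∧ 1 ≤ k ∧ i ^ k ≤ n then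
    let m := i ^ k
    let sq := isqrtI m
    bInner n k (i + 1) (if sq * sq ≠ m then PySem.Set.add s m else s)
  else s
termination_by (n + 1 - i).toNat
decreasing_by
  rename_i h
  have h1 : i ≤ i ^ k := le_self_pow₀ (by omega) (by omega)
  have h2 : i ≤ n := le_trans h1 h.2.2
  omega

-- 'while 2 ** k <= n: <inner loop>; k += 1'
def bOuter (n : Int) (k : Nat) (s : PySem.Set Int) : PySem.Set Int :=
  if (2 : Int) ^ k ≤ n then bOuter n (k + 1) (bInner n k 2 s) else s
termination_by (n + 1 - 2 ^ k).toNat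
decreasing_by
  rename_i h
  have h1 : (1 : Int) ≤ 2 ^ k := one_le_pow₀ (by omega)
  omega

def solve_alt (n : Int) : Int :=
  if n < 4 then n
  else
    let r := isqrtI n
    let extras := bOuter n 3 (PySem.Set.ofList [])
    n - (r - 1) - (extras.length : Int)

-- ===== PRECONDITION & SPEC =====
def Spec_solve (n : Int) (out : Int) : Prop := out = solve_alt n
instance (n : Int) (out : Int) : Decidable (Spec_solve n out) := by unfold Spec_solve; infer_instance

-- ===== CLAIM (what is proved, stated in full; the proofs are below) =====
def Claim_equal_solve : Prop := ∀ (n : Int), Dom_solve n → Spec_solve n (solve n)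

-- ===== LEMMAS AND PROOFS =====

theorem mem_powersFrom {n i d m : Int} (hi : 2 ≤ i) (hd : 1 ≤ d) :
    m ∈ powersFrom n i d ↔ ∃ t : Nat, m = d * i ^ t ∧ d * i ^ t ≤ n := by
  fun_induction powersFrom n i d with
  | case1 d h ih =>
    rw [List.mem_cons, ih (by nlinarith)]
    constructor
    · rintro (rfl | ⟨t, rfl, hle⟩)
      · exact ⟨0, by simp, by simpa using h.2.2⟩
      · refine ⟨t + 1, by ring, ?_⟩
        have e : d * i ^ (t + 1) = d * i * i ^ t := by ring
        rw [e]; exact hle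
    · rintro ⟨t, rfl, hle⟩
      cases t with
      | zero => left; simp
      | succ t => right
                  refine ⟨t, by ring, ?_⟩
                  have e : d * i * i ^ t = d * i ^ (t + 1) := by ring
                  rw [e]; exact hle
  | case2 d h =>
    simp only [List.not_mem_nil, false_iff]
    rintro ⟨t, rfl, hle⟩
    have h1 : (1:Int) ≤ i ^ t := one_le_pow₀ (by omega)
    have h2 : d ≤ d * i ^ t := le_mul_of_one_le_right (by omega) h1
    exact h (⟨hi, hd, by omega⟩)

theorem mem_aLoop (n m a : Int) (ha : 2 ≤ a) :
    m ∈ aLoop n (PySem.List.pyRange a n 1) ↔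
      ∃ i, a ≤ i ∧ i * i ≤ n ∧ m ∈ powersFrom n i (i * i) := by
  by_cases hab : a < n
  · rw [PySem.List.pyRange_one_cons hab]
    simp only [aLoop]
    by_cases hgt : a * a > n
    · rw [if_pos hgt]
      simp only [List.not_mem_nil, false_iff]
      rintro ⟨i, hai, hin, _⟩; nlinarith
    · rw [if_neg hgt, List.mem_append, mem_aLoop n m (a + 1) (by omega)]
      constructor
      · rintro (hm | ⟨i, hai, hin, hm⟩)
        · exact ⟨a, le_rfl, by omega, hm⟩
        · exact ⟨i, by omega, hin, hm⟩
      · rintro ⟨i, hai, hin, hm⟩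
        rcases eq_or_lt_of_le hai with rfl | hlt
        · exact Or.inl hm
        · exact Or.inr ⟨i, by omega, hin, hm⟩
  · rw [PySem.List.pyRange_one_eq_nil (by omega)]
    simp only [aLoop, List.not_mem_nil, false_iff]
    rintro ⟨i, hai, hin, _⟩; nlinarith
termination_by (n - a).toNat
decreasing_by omega

theorem memA {n m : Int} : m ∈ aLoop n (PySem.List.pyRange 2 n 1) ↔
    ∃ (i : Int) (k : Nat), 2 ≤ i ∧ 2 ≤ k ∧ m = i ^ k ∧ i ^ k ≤ n := by
  rw [mem_aLoop n m 2 le_rfl]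
  constructor
  · rintro ⟨i, hi, hin, hm⟩
    rw [mem_powersFrom hi (by nlinarith)] at hm
    obtain ⟨t, rfl, hle⟩ := hm
    refine ⟨i, t + 2, hi, by omega, by ring, ?_⟩
    have e : i ^ (t + 2) = i * i * i ^ t := by ring
    rw [e]; exact hle
  · rintro ⟨i, k, hi, hk, rfl, hle⟩
    have hsq : i * i ≤ i ^ k := by
      have : i ^ 2 ≤ i ^ k := pow_le_pow_right₀ (by omega) hk
      nlinarith [this]
    refine ⟨i, hi, le_trans hsq hle, ?_⟩
    rw [mem_powersFrom hi (by nlinarith)]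
    have e : i * i * i ^ (k - 2) = i ^ k := by
      rw [← pow_two, ← pow_add]; congr 1; omega
    exact ⟨k - 2, e.symm, e ▸ hle⟩
theorem isqrtUp_spec (n hi : Int) (h : 1 ≤ hi) :
    hi ≤ isqrtUp n hi ∧ n < isqrtUp n hi * isqrtUp n hi := by
  fun_induction isqrtUp n hi with
  | case1 hi hg ih =>
    obtain ⟨h1, h2⟩ := ih (by omega)
    exact ⟨by omega, h2⟩
  | case2 hi hg =>
    refine ⟨le_rfl, ?_⟩
    by_contra hc
    exact hg ⟨h, by omega⟩

theorem isqrtBin_spec (n lo hi : Int) (h0 : 0 ≤ lo) (hlt : lo < hi)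
    (hlo : lo * lo ≤ n) (hhi : n < hi * hi) :
    0 ≤ isqrtBin n lo hi ∧ isqrtBin n lo hi * isqrtBin n lo hi ≤ n ∧
      n < (isqrtBin n lo hi + 1) * (isqrtBin n lo hi + 1) := by
  fun_induction isqrtBin n lo hi with
  | case1 lo hi hg mid hm ih =>
    have hmid : mid = (lo + hi) / 2 := PySem.Int.floordiv_eq_ediv_of_pos (by omega)
    have hb : lo + 1 ≤ mid ∧ mid + 1 ≤ hi := by rw [hmid]; omega
    exact ih (by omega) (by omega) hm hhi
  | case2 lo hi hg mid hm ih =>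
    have hmid : mid = (lo + hi) / 2 := PySem.Int.floordiv_eq_ediv_of_pos (by omega)
    have hb : lo + 1 ≤ mid ∧ mid + 1 ≤ hi := by rw [hmid]; omega
    exact ih h0 (by omega) hlo (by omega)
  | case3 lo hi hg =>
    have : hi = lo + 1 := by omega
    exact ⟨h0, hlo, by rw [← this]; exact hhi⟩

theorem isqrt_spec (n : Int) (hn : 0 ≤ n) :
    0 ≤ isqrtI n ∧ isqrtI n * isqrtI n ≤ n ∧ n < (isqrtI n + 1) * (isqrtI n + 1) := by
  obtain ⟨h1, h2⟩ := isqrtUp_spec n 1 le_rfl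
  exact isqrtBin_spec n 0 (isqrtUp n 1) le_rfl (by omega) (by omega) h2

theorem sq_char (m : Int) (hm : 0 ≤ m) :
    isqrtI m * isqrtI m = m ↔ ∃ j : Int, 0 ≤ j ∧ j * j = m := by
  obtain ⟨h0, h1, h2⟩ := isqrt_spec m hm
  constructor
  · intro h; exact ⟨isqrtI m, h0, h⟩
  · rintro ⟨j, hj, rfl⟩
    have hle : j ≤ isqrtI (j * j) := by nlinarith
    have hge : isqrtI (j * j) ≤ j := by nlinarith
    have he : isqrtI (j * j) = j := le_antisymm hge hle
    rw [he]
theorem mem_bInner (n : Int) (k : Nat) (i : Int) (s : PySem.Set Int) (m : Int)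
    (hk : 1 ≤ k) (hi : 2 ≤ i) :
    m ∈ bInner n k i s ↔ m ∈ s ∨
      ∃ j : Int, i ≤ j ∧ j ^ k ≤ n ∧ m = j ^ k ∧ isqrtI m * isqrtI m ≠ m := by
  by_cases hg : 2 ≤ i ∧ 1 ≤ k ∧ i ^ k ≤ n
  · rw [bInner, if_pos hg]
    simp only []
    rw [mem_bInner n k (i + 1) _ m hk (by omega)]
    have hset : m ∈ (if isqrtI (i ^ k) * isqrtI (i ^ k) ≠ i ^ k
          then PySem.Set.add s (i ^ k) else s) ↔
        m ∈ s ∨ (m = i ^ k ∧ isqrtI m * isqrtI m ≠ m) := by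
      split
      · rw [PySem.Set.mem_add]
        constructor
        · rintro (h | rfl)
          · exact Or.inl h
          · rename_i hc; exact Or.inr ⟨rfl, hc⟩
        · rintro (h | ⟨rfl, _⟩)
          · exact Or.inl h
          · exact Or.inr rfl
      · rename_i hc
        rw [not_ne_iff] at hc
        constructor
        · exact Or.inl
        · rintro (h | ⟨rfl, hne⟩)
          · exact h
          · exact absurd hc hne
    rw [hset]
    constructor
    · rintro ((h | ⟨rfl, hne⟩) | ⟨j, hij, hjn, rfl, hne⟩)
      · exact Or.inl h
      · exact Or.inr ⟨i, le_rfl, hg.2.2, rfl, hne⟩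
      · exact Or.inr ⟨j, by omega, hjn, rfl, hne⟩
    · rintro (h | ⟨j, hij, hjn, rfl, hne⟩)
      · exact Or.inl (Or.inl h)
      · rcases eq_or_lt_of_le hij with rfl | hlt
        · exact Or.inl (Or.inr ⟨rfl, hne⟩)
        · exact Or.inr ⟨j, by omega, hjn, rfl, hne⟩
  · rw [bInner, if_neg hg]
    have hn : n < i ^ k := by
      by_contra hc; exact hg ⟨hi, hk, by omega⟩
    constructor
    · exact Or.inl
    · rintro (h | ⟨j, hij, hjn, rfl, _⟩)
      · exact h
      · have : i ^ k ≤ j ^ k := pow_le_pow_left₀ (by omega) hij k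
        omega
termination_by (n + 1 - i).toNat
decreasing_by
  have h1 : i ≤ i ^ k := le_self_pow₀ (by omega) (by omega)
  omega

theorem mem_bOuter (n : Int) (k : Nat) (s : PySem.Set Int) (m : Int) (hk : 1 ≤ k) :
    m ∈ bOuter n k s ↔ m ∈ s ∨
      ∃ (j : Int) (k' : Nat), 2 ≤ j ∧ k ≤ k' ∧ j ^ k' ≤ n ∧ m = j ^ k' ∧
        isqrtI m * isqrtI m ≠ m := by
  by_cases hg : (2 : Int) ^ k ≤ n
  · rw [bOuter, if_pos hg]
    rw [mem_bOuter n (k + 1) _ m (by omega)]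
    rw [mem_bInner n k 2 s m hk le_rfl]
    constructor
    · rintro ((h | ⟨j, hij, hjn, rfl, hne⟩) | ⟨j, k', hj, hkk, hjn, rfl, hne⟩)
      · exact Or.inl h
      · exact Or.inr ⟨j, k, hij, le_rfl, hjn, rfl, hne⟩
      · exact Or.inr ⟨j, k', hj, by omega, hjn, rfl, hne⟩
    · rintro (h | ⟨j, k', hj, hkk, hjn, rfl, hne⟩)
      · exact Or.inl (Or.inl h)
      · rcases Nat.eq_or_lt_of_le hkk with rfl | hlt
        · exact Or.inl (Or.inr ⟨j, hj, hjn, rfl, hne⟩)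
        · exact Or.inr ⟨j, k', hj, by omega, hjn, rfl, hne⟩
  · rw [bOuter, if_neg hg]
    constructor
    · exact Or.inl
    · rintro (h | ⟨j, k', hj, hkk, hjn, rfl, _⟩)
      · exact h
      · have h1 : (2 : Int) ^ k ≤ 2 ^ k' := pow_le_pow_right₀ (by omega) hkk
        have h2 : (2 : Int) ^ k' ≤ j ^ k' := pow_le_pow_left₀ (by omega) hj k'
        omega
termination_by (n + 1 - 2 ^ k).toNat
decreasing_by
  have h1 : (1 : Int) ≤ 2 ^ k := one_le_pow₀ (by omega)
  omega

theorem nodup_bInner (n : Int) (k : Nat) (i : Int) (s : PySem.Set Int)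
    (h : s.Nodup) : (bInner n k i s).Nodup := by
  fun_induction bInner n k i s with
  | case1 i s hg m sq ih =>
    apply ih
    split
    · exact PySem.Set.nodup_add _ _ h
    · exact h
  | case2 i s hg => exact h

theorem nodup_bOuter (n : Int) (k : Nat) (s : PySem.Set Int)
    (h : s.Nodup) : (bOuter n k s).Nodup := by
  fun_induction bOuter n k s with
  | case1 k s hg ih => exact ih (nodup_bInner n k 2 s h)
  | case2 k s hg => exact h
theorem pow_ge_four {i : Int} {k : Nat} (hi : 2 ≤ i) (hk : 2 ≤ k) : (4 : Int) ≤ i ^ k := by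
  have h1 : (2 : Int) ^ k ≤ i ^ k := pow_le_pow_left₀ (by omega) hi k
  have h2 : (2 : Int) ^ 2 ≤ 2 ^ k := pow_le_pow_right₀ (by omega) hk
  norm_num at h2
  omega

theorem main_count (n : Int) (hn : 4 ≤ n) :
    ((PySem.Set.ofList (aLoop n (PySem.List.pyRange 2 n 1))).length : Int)
      = (isqrtI n - 1) + ((bOuter n 3 (PySem.Set.ofList [])).length : Int) := by
  set LA : List Int := PySem.Set.ofList (aLoop n (PySem.List.pyRange 2 n 1)) with hLA
  set E : List Int := bOuter n 3 (PySem.Set.ofList []) with hE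
  set r : Int := isqrtI n with hr
  obtain ⟨hr0, hr1, hr2⟩ := isqrt_spec n (by omega)
  have hrge2 : 2 ≤ r := by nlinarith
  have hLAnd : LA.Nodup := PySem.Set.nodup_ofList _
  have hEnd : E.Nodup := by
    rw [hE, PySem.Set.ofList_nil]; exact nodup_bOuter n 3 [] List.nodup_nil
  have hmemLA : ∀ m : Int, m ∈ LA ↔
      ∃ (i : Int) (k : Nat), 2 ≤ i ∧ 2 ≤ k ∧ m = i ^ k ∧ i ^ k ≤ n := by
    intro m; rw [hLA, PySem.Set.mem_ofList, memA]
  have hmemE : ∀ m : Int, m ∈ E ↔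
      ∃ (j : Int) (k' : Nat), 2 ≤ j ∧ 3 ≤ k' ∧ j ^ k' ≤ n ∧ m = j ^ k' ∧
        isqrtI m * isqrtI m ≠ m := by
    intro m
    rw [hE, PySem.Set.ofList_nil, mem_bOuter n 3 [] m (by omega)]
    simp only [List.not_mem_nil, false_or]
  set SQ : Finset Int := (Finset.Icc 2 r).image (fun j => j * j) with hSQ
  have hunion : LA.toFinset = SQ ∪ E.toFinset := by
    ext m
    rw [List.mem_toFinset, Finset.mem_union, List.mem_toFinset, hmemLA m, hmemE m]
    constructor
    · rintro ⟨i, k, hi, hk, rfl, hle⟩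
      have hm4 : (4 : Int) ≤ i ^ k := pow_ge_four hi hk
      by_cases hsq : ∃ j : Int, 0 ≤ j ∧ j * j = i ^ k
      · left
        obtain ⟨j, hj0, hjj⟩ := hsq
        have hj2 : 2 ≤ j := by nlinarith
        have hjr : j ≤ r := by nlinarith
        rw [hSQ, Finset.mem_image]
        exact ⟨j, Finset.mem_Icc.mpr ⟨hj2, hjr⟩, hjj⟩
      · right
        have hk3 : 3 ≤ k := by
          rcases Nat.lt_or_ge k 3 with h | h
          · interval_cases k
            · exact absurd ⟨i, by omega, by rw [← pow_two]⟩ hsq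
          · exact h
        refine ⟨i, k, hi, hk3, hle, rfl, ?_⟩
        rw [ne_eq, sq_char _ (by omega)]
        exact hsq
    · rintro (hm | hm)
      · rw [hSQ, Finset.mem_image] at hm
        obtain ⟨j, hj, rfl⟩ := hm
        rw [Finset.mem_Icc] at hj
        refine ⟨j, 2, hj.1, le_rfl, (pow_two j).symm ▸ rfl, ?_⟩
        rw [← pow_two] at *
        nlinarith [hj.1, hj.2]
      · obtain ⟨j, k', hj, hk', hle, rfl, _⟩ := hm
        exact ⟨j, k', hj, by omega, rfl, hle⟩
  have hdisj : Disjoint SQ E.toFinset := by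
    rw [Finset.disjoint_left]
    intro m hm hmE
    rw [hSQ, Finset.mem_image] at hm
    obtain ⟨j, hj, rfl⟩ := hm
    rw [Finset.mem_Icc] at hj
    rw [List.mem_toFinset, hmemE] at hmE
    obtain ⟨_, _, _, _, _, _, hne⟩ := hmE
    exact hne ((sq_char _ (by nlinarith)).mpr ⟨j, by omega, rfl⟩)
  have hcardSQ : SQ.card = (r - 1).toNat := by
    rw [hSQ, Finset.card_image_of_injOn, Int.card_Icc]
    · congr 1; omega
    · intro a ha b hb hab
      rw [Finset.mem_coe, Finset.mem_Icc] at ha hb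
      nlinarith [ha.1, hb.1]
  have hcards : LA.length = (r - 1).toNat + E.length := by
    rw [← List.toFinset_card_of_nodup hLAnd, hunion,
      Finset.card_union_of_disjoint hdisj, hcardSQ,
      List.toFinset_card_of_nodup hEnd]
  rw [hcards]
  push_cast
  omega

theorem solve_eq_alt (n : Int) : solve n = solve_alt n := by
  by_cases hn : n < 4
  · have hnil : aLoop n (PySem.List.pyRange 2 n 1) = [] := by
      rw [List.eq_nil_iff_forall_not_mem]
      intro m hm
      rw [memA] at hm
      obtain ⟨i, k, hi, hk, _, hle⟩ := hm
      have := pow_ge_four hi hk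
      omega
    rw [solve, solve_alt, if_pos hn, hnil, PySem.Set.ofList_nil]
    simp
  · rw [solve, solve_alt, if_neg hn]
    have h := main_count n (by omega)
    simp only []
    omega

-- ===== VERDICT (by name: the statement is the Claim_ definition above) =====
theorem solve_spec : Claim_equal_solve := by
  intro n _
  exact solve_eq_alt n
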